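-- pv_equiv track=rewrite | github.com/AwotG/LatchQAEngineerAssessment | balance_weighted_scales.py | check_with_two_weights
-- ===== SOURCE A (Python) =====
-- from itertools import combinations
--
-- def check_with_two_weights(left_scale, right_scale, weight_list):
--     for pair in combinations(weight_list, 2):
--         if pair[0] + left_scale == pair[1] + right_scale \
--                 or pair[0] + right_scale == pair[1] + left_scale\
--                 or pair[0] + pair[1] + left_scale == right_scale \
--                 or pair[0] + pair[1] + right_scale == left_scale:
--             l, i = min(pair), max(pair)
--             return ','.join([str(l), str(i)])
--     return "No possible solution. Please try again."
-- ===== SOURCE B (Python) =====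
-- def first_greater(lst, i):
--     for k in lst:
--         if k > i:
--             return k
--     return None
--
--
-- def check_with_two_weights(left_scale, right_scale, weight_list):
--     # index every value by its (ascending) positions, once
--     pos = {}
--     for idx, w in enumerate(weight_list):
--         pos[w] = pos.get(w, []) + [idx]
--     d = left_scale - right_scale
--     for i, a in enumerate(weight_list):
--         best = None
--         # the four partner values that would balance the scales with a
--         for t in (a + d, a - d, -a - d, d - a):
--             j = first_greater(pos.get(t, []), i)
--             if j is not None and (best is None or j < best[0]):
--                 best = (j, t)
--         if best is not None:
--             b = best[1]
--             lo, hi = (a, b) if a <= b else (b, a)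
--             return str(lo) + "," + str(hi)
--     return "No possible solution. Please try again."
-- ===== Notes on version B (the rewrite author's own statement) =====
-- stated objective: faster
-- what changed: B replaces A's scan of all O(n^2) pairs by a value-to-sorted-positions dictionary built in one pass; for each element it looks up only its four balancing partner values and takes the earliest following position, preserving A's first-pair order.
import Mathlib
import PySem

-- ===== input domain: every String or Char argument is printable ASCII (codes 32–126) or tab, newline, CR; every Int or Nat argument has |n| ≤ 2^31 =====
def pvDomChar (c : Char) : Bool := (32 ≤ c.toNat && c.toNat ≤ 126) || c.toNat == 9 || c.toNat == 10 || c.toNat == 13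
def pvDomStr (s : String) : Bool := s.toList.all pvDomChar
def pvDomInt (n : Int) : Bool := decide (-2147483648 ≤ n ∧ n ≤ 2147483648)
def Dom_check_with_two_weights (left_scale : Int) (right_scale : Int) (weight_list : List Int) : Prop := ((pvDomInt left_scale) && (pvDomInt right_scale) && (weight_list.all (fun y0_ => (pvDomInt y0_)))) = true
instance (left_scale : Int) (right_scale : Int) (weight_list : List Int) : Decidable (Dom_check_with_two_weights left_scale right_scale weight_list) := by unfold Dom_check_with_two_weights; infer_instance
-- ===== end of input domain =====

-- B replaces A's quadratic scan over all pairs by a value→positions index built once: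
-- for each element only the four balancing partner values are looked up. Return values equal; no side effects.

-- ===== PORT A =====
-- itertools.combinations(ws, 2) in Python's order
def combs2 : List Int → List (Int × Int)
  | [] => []
  | a :: rest => rest.map (fun b => (a, b)) ++ combs2 rest

def condA (left_scale right_scale a b : Int) : Bool :=
  (a + left_scale == b + right_scale) || (a + right_scale == b + left_scale) ||
    (a + b + left_scale == right_scale) || (a + b + right_scale == left_scale)

def loopA (left_scale right_scale : Int) : List (Int × Int) → String
  | [] => "No possible solution. Please try again."
  | (a, b) :: rest =>
    if condA left_scale right_scale a b then
      -- l, i = min(pair), max(pair); ','.join([str(l), str(i)])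
      PySem.Int.toStr (if a ≤ b then a else b) ++ "," ++ PySem.Int.toStr (if b ≤ a then a else b)
    else loopA left_scale right_scale rest

def check_with_two_weights (left_scale : Int) (right_scale : Int) (weight_list : List Int) : String :=
  loopA left_scale right_scale (combs2 weight_list)

-- ===== PORT B =====
def firstGreater (lst : List Int) (i : Int) : Option Int :=
  match lst with
  | [] => none
  | k :: rest => if i < k then some k else firstGreater rest i

-- pos[w] = pos.get(w, []) + [idx] over enumerate(weight_list)
def buildPos (i : Int) (ws : List Int) (pos : PySem.Dict Int (List Int)) : PySem.Dict Int (List Int) :=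
  match ws with
  | [] => pos
  | w :: rest => buildPos (i + 1) rest (pos.insert w (pos.getD w [] ++ [i]))

-- the inner 'for t in targets' loop accumulating best = (j, t) with minimal j
def bestOf (F : Int → Option Int) : List Int → Option (Int × Int) → Option (Int × Int)
  | [], best => best
  | t :: ts, best =>
    match F t with
    | none => bestOf F ts best
    | some j =>
      match best with
      | none => bestOf F ts (some (j, t))
      | some p => bestOf F ts (if j < p.1 then (j, t) else p)

def loopB (d : Int) (pos : PySem.Dict Int (List Int)) (i : Int) : List Int → String
  | [] => "No possible solution. Please try again."
  | a :: rest =>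
    match bestOf (fun t => firstGreater (pos.getD t []) i) [a + d, a - d, -a - d, d - a] none with
    | some (_, b) =>
        PySem.Int.toStr (if a ≤ b then a else b) ++ "," ++ PySem.Int.toStr (if a ≤ b then b else a)
    | none => loopB d pos (i + 1) rest

def check_with_two_weights_alt (left_scale : Int) (right_scale : Int) (weight_list : List Int) : String :=
  loopB (left_scale - right_scale) (buildPos 0 weight_list PySem.Dict.empty) 0 weight_list

-- ===== PRECONDITION & SPEC =====
def Spec_check_with_two_weights (left_scale : Int) (right_scale : Int) (weight_list : List Int) (out : String) : Prop := out = check_with_two_weights_alt left_scale right_scale weight_list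
instance (left_scale : Int) (right_scale : Int) (weight_list : List Int) (out : String) : Decidable (Spec_check_with_two_weights left_scale right_scale weight_list out) := by unfold Spec_check_with_two_weights; infer_instance

-- ===== CLAIM (what is proved, stated in full; the proofs are below) =====
def Claim_equal_check_with_two_weights : Prop := ∀ (left_scale : Int) (right_scale : Int) (weight_list : List Int), Dom_check_with_two_weights left_scale right_scale weight_list → Spec_check_with_two_weights left_scale right_scale weight_list (check_with_two_weights left_scale right_scale weight_list)

-- ===== LEMMAS AND PROOFS =====

-- the ascending list of indices (counted from m) at which t occurs in ws
def idxF (t : Int) (m : Int) : List Int → List Int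
  | [] => []
  | w :: rest => (if w = t then [m] else []) ++ idxF t (m + 1) rest

lemma pos_getD : ∀ (ws : List Int) (i : Int) (pos : PySem.Dict Int (List Int)) (t : Int),
    (buildPos i ws pos).getD t [] = pos.getD t [] ++ idxF t i ws := by
  intro ws
  induction ws with
  | nil => intro i pos t; simp [buildPos, idxF]
  | cons w rest ih =>
    intro i pos t
    simp only [buildPos, idxF, ih, PySem.Dict.getD_insert]
    by_cases h : t = w
    · subst h; simp
    · simp [h, (Ne.symm h : w ≠ t)]

lemma mem_idxF_bounds : ∀ (ws : List Int) (t m k : Int), k ∈ idxF t m ws → m ≤ k ∧ k < m + ws.length := by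
  intro ws
  induction ws with
  | nil => intro t m k h; simp [idxF] at h
  | cons w rest ih =>
    intro t m k h
    simp only [idxF, List.mem_append] at h
    rcases h with h | h
    · by_cases hw : w = t
      · simp only [if_pos hw, List.mem_singleton] at h
        simp only [List.length_cons]
        omega
      · simp [if_neg hw] at h
    · have := ih t (m + 1) k h
      simp only [List.length_cons]
      omega

lemma firstGreater_append_le (i : Int) : ∀ (l1 l2 : List Int), (∀ k ∈ l1, k ≤ i) →
    firstGreater (l1 ++ l2) i = firstGreater l2 i := by
  intro l1
  induction l1 with
  | nil => intro l2 _; simp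
  | cons k l1 ih =>
    intro l2 h
    have hk : k ≤ i := h k (by simp)
    simp only [List.cons_append, firstGreater, if_neg (by omega : ¬ i < k)]
    exact ih l2 (fun x hx => h x (by simp [hx]))

lemma firstGreater_all_gt (i : Int) (l : List Int) (h : ∀ k ∈ l, i < k) :
    firstGreater l i = l.head? := by
  cases l with
  | nil => rfl
  | cons k rest => simp [firstGreater, if_pos (h k (by simp))]

-- the four candidate j's folded to the minimal one, specified as a left-to-right scan of rest
def specFind (ts : List Int) (m : Int) : List Int → Option (Int × Int)
  | [] => none
  | b :: rest => if b ∈ ts then some (m, b) else specFind ts (m + 1) rest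

lemma bestOf_none (F : Int → Option Int) : ∀ (ts : List Int) (acc : Option (Int × Int)),
    (∀ t ∈ ts, F t = none) → bestOf F ts acc = acc := by
  intro ts
  induction ts with
  | nil => intro acc _; rfl
  | cons t ts ih =>
    intro acc h
    simp only [bestOf, h t (by simp)]
    exact ih acc (fun x hx => h x (by simp [hx]))

lemma bestOf_congr (F G : Int → Option Int) : ∀ (ts : List Int) (acc : Option (Int × Int)),
    (∀ t ∈ ts, F t = G t) → bestOf F ts acc = bestOf G ts acc := by
  intro ts
  induction ts with
  | nil => intro acc _; rfl
  | cons t ts ih =>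
    intro acc h
    have h0 := h t (by simp)
    have hrest : ∀ x ∈ ts, F x = G x := fun x hx => h x (by simp [hx])
    simp only [bestOf, h0]
    cases G t with
    | none => exact ih acc hrest
    | some j =>
      cases acc with
      | none => exact ih _ hrest
      | some p => exact ih _ hrest

lemma bestOf_min (F : Int → Option Int) (m b : Int) : ∀ (ts : List Int) (acc : Option (Int × Int)),
    (∀ t ∈ ts, ∀ j, F t = some j → m ≤ j ∧ (j = m → t = b)) →
    (acc = some (m, b) ∨ ((acc = none ∨ ∃ j' t', acc = some (j', t') ∧ m < j') ∧ ∃ t ∈ ts, F t = some m)) →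
    bestOf F ts acc = some (m, b) := by
  intro ts
  induction ts with
  | nil =>
    intro acc _ hacc
    rcases hacc with h | ⟨_, t, ht, _⟩
    · simpa [bestOf] using h
    · simp at ht
  | cons t ts ih =>
    intro acc hb hacc
    have hbt := hb t (by simp)
    have hbrest : ∀ x ∈ ts, ∀ j, F x = some j → m ≤ j ∧ (j = m → x = b) :=
      fun x hx => hb x (by simp [hx])
    cases hF : F t with
    | none =>
      simp only [bestOf, hF]
      apply ih acc hbrest
      rcases hacc with h | ⟨ha, t', ht', hFt'⟩
      · exact Or.inl h
      · refine Or.inr ⟨ha, t', ?_, hFt'⟩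
        rcases List.mem_cons.mp ht' with rfl | h
        · rw [hF] at hFt'; exact absurd hFt' (by simp)
        · exact h
    | some j =>
      have hj := hbt j hF
      simp only [bestOf, hF]
      rcases hacc with h | ⟨ha, hex⟩
      · subst h
        show bestOf F ts (if j < m then some (j, t) else some (m, b)) = some (m, b)
        rw [if_neg (by omega : ¬ j < m)]
        exact ih _ hbrest (Or.inl rfl)
      · -- acc = none or some (j', t') with m < j'
        by_cases hjm : j = m
        · subst hjm
          have hbj := hj.2 rfl
          subst hbj
          rcases ha with rfl | ⟨j', t', rfl, hj'⟩
          · exact ih _ hbrest (Or.inl rfl)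
          · show bestOf F ts (if j < j' then some (j, t) else some (j', t')) = some (j, t)
            rw [if_pos (by omega : j < j')]
            exact ih _ hbrest (Or.inl rfl)
        · -- m < j; the witness F t'' = some m must be in ts
          obtain ⟨t'', ht'', hFt''⟩ := hex
          have ht''ts : t'' ∈ ts := by
            rcases List.mem_cons.mp ht'' with rfl | h
            · rw [hF] at hFt''
              exact absurd (Option.some.inj hFt'') hjm
            · exact h
          have hmj : m < j := by rcases hj with ⟨h1, _⟩; omega
          rcases ha with rfl | ⟨j', t', rfl, hj'⟩
          · show bestOf F ts (some (j, t)) = some (m, b)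
            exact ih _ hbrest (Or.inr ⟨Or.inr ⟨j, t, rfl, hmj⟩, t'', ht''ts, hFt''⟩)
          · show bestOf F ts (if j < j' then some (j, t) else some (j', t')) = some (m, b)
            split
            · exact ih _ hbrest (Or.inr ⟨Or.inr ⟨j, t, rfl, hmj⟩, t'', ht''ts, hFt''⟩)
            · exact ih _ hbrest (Or.inr ⟨Or.inr ⟨j', t', rfl, hj'⟩, t'', ht''ts, hFt''⟩)

lemma head?_idxF_ge (t m : Int) (ws : List Int) (j : Int) (h : (idxF t m ws).head? = some j) : m ≤ j := by
  have : j ∈ idxF t m ws := List.mem_of_mem_head? h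
  exact (mem_idxF_bounds ws t m j this).1

lemma bestOf_eq_specFind (ts : List Int) : ∀ (rest : List Int) (m : Int),
    bestOf (fun t => (idxF t m rest).head?) ts none = specFind ts m rest := by
  intro rest
  induction rest with
  | nil =>
    intro m
    simp only [specFind]
    exact bestOf_none _ ts none (by intro t _; simp [idxF])
  | cons b rest ih =>
    intro m
    have hF : ∀ t, (idxF t m (b :: rest)).head? =
        if t = b then some m else (idxF t (m + 1) rest).head? := by
      intro t
      by_cases h : t = b
      · subst h; simp [idxF]
      · rw [if_neg h]
        simp [idxF, (Ne.symm h : ¬ b = t)]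
    by_cases hb : b ∈ ts
    · simp only [specFind, if_pos hb]
      apply bestOf_min
      · intro t _ j hj
        rw [hF t] at hj
        by_cases h : t = b
        · rw [if_pos h] at hj
          have hjm : m = j := Option.some.inj hj
          exact ⟨by omega, fun _ => h⟩
        · rw [if_neg h] at hj
          have := head?_idxF_ge t (m + 1) rest j hj
          exact ⟨by omega, fun hjm => absurd hjm (by omega)⟩
      · refine Or.inr ⟨Or.inl rfl, b, hb, ?_⟩
        rw [hF b, if_pos rfl]
    · simp only [specFind, if_neg hb]
      rw [← ih (m + 1)]
      apply bestOf_congr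
      intro t ht
      rw [hF t, if_neg (by rintro rfl; exact hb ht)]

lemma condA_mem (L R a b : Int) :
    condA L R a b = true ↔ b ∈ [a + (L - R), a - (L - R), -a - (L - R), (L - R) - a] := by
  simp only [condA, Bool.or_eq_true, beq_iff_eq, List.mem_cons, List.not_mem_nil, or_false]
  omega

lemma fmt_eq (a b : Int) : (if b ≤ a then a else b) = (if a ≤ b then b else a) := by
  split_ifs <;> omega

lemma loopA_split (L R a : Int) : ∀ (rest : List Int) (m : Int) (P : List (Int × Int)),
    loopA L R (rest.map (fun b => (a, b)) ++ P) =
      match specFind [a + (L - R), a - (L - R), -a - (L - R), (L - R) - a] m rest with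
      | some (_, b) => PySem.Int.toStr (if a ≤ b then a else b) ++ "," ++
          PySem.Int.toStr (if b ≤ a then a else b)
      | none => loopA L R P := by
  intro rest
  induction rest with
  | nil => intro m P; simp [specFind]
  | cons b rest ih =>
    intro m P
    simp only [List.map_cons, List.cons_append, loopA, specFind]
    by_cases hc : condA L R a b = true
    · rw [if_pos hc, if_pos ((condA_mem L R a b).mp hc)]
    · rw [if_neg hc, if_neg (fun h => hc ((condA_mem L R a b).mpr h)), ih (m + 1) P]

lemma idxF_append (t : Int) : ∀ (l1 l2 : List Int) (m : Int),
    idxF t m (l1 ++ l2) = idxF t m l1 ++ idxF t (m + l1.length) l2 := by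
  intro l1
  induction l1 with
  | nil => intro l2 m; simp [idxF]
  | cons w l1 ih =>
    intro l2 m
    simp only [List.cons_append, idxF, ih, List.length_cons, List.append_assoc]
    have : m + 1 + (l1.length : Int) = m + ((l1.length + 1 : Nat) : Int) := by push_cast; ring
    rw [this]

lemma firstGreater_global (t : Int) (pre rest : List Int) (a : Int) :
    firstGreater (idxF t 0 (pre ++ a :: rest)) (pre.length : Int) =
      (idxF t ((pre.length : Int) + 1) rest).head? := by
  set i : Int := (pre.length : Int) with hi
  rw [idxF_append]
  rw [firstGreater_append_le i _ _ (by
    intro k hk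
    have := mem_idxF_bounds pre t 0 k hk
    omega)]
  have : idxF t (0 + (pre.length : Int)) (a :: rest) =
      (if a = t then [i] else []) ++ idxF t (i + 1) rest := by
    simp [idxF, hi]
  rw [this]
  rw [firstGreater_append_le i _ _ (by intro k hk; split at hk <;> simp at hk; omega)]
  apply firstGreater_all_gt
  intro k hk
  have := mem_idxF_bounds rest t (i + 1) k hk
  omega

lemma main_lemma (L R : Int) : ∀ (suffix pre : List Int),
    loopA L R (combs2 suffix) =
      loopB (L - R) (buildPos 0 (pre ++ suffix) PySem.Dict.empty) (pre.length : Int) suffix := by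
  intro suffix
  induction suffix with
  | nil => intro pre; simp [combs2, loopA, loopB]
  | cons a rest ih =>
    intro pre
    set ws0 := pre ++ a :: rest with hws0
    set i : Int := (pre.length : Int) with hi
    have hpos : ∀ t, (buildPos 0 ws0 PySem.Dict.empty).getD t [] = idxF t 0 ws0 := by
      intro t
      rw [pos_getD]
      simp [PySem.Dict.getD, PySem.Dict.get?, PySem.Dict.empty]
    have hFG : ∀ t, firstGreater ((buildPos 0 ws0 PySem.Dict.empty).getD t []) i =
        (idxF t (i + 1) rest).head? := by
      intro t
      rw [hpos t, hws0, hi]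
      exact firstGreater_global t pre rest a
    simp only [combs2, loopB]
    rw [loopA_split L R a rest (i + 1) (combs2 rest)]
    rw [bestOf_congr _ (fun t => (idxF t (i + 1) rest).head?) _ none (fun t _ => hFG t)]
    rw [bestOf_eq_specFind]
    cases hsf : specFind [a + (L - R), a - (L - R), -a - (L - R), (L - R) - a] (i + 1) rest with
    | some p =>
      obtain ⟨j, b⟩ := p
      simp only [fmt_eq a b]
    | none =>
      have := ih (pre ++ [a])
      simp only [List.append_assoc, List.cons_append, List.nil_append] at this
      rw [this]
      have : ((pre ++ [a]).length : Int) = i + 1 := by simp [hi]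
      rw [this]

-- ===== VERDICT (by name: the statement is the Claim_ definition above) =====
theorem check_with_two_weights_spec : Claim_equal_check_with_two_weights := by
  intro L R ws _
  unfold Spec_check_with_two_weights check_with_two_weights check_with_two_weights_alt
  simpa using main_lemma L R ws []
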